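-- pv_equiv track=rewrite | github.com/Andalusia-Data-Science-Team/AutoMapper | src/mapper/answer_parser.py | parse_llm_answer
-- ===== SOURCE A (Python) =====
-- def parse_llm_answer(answer: str):
--     best_code = ""
--     best_desc = ""
--     explanation = ""
--
--     for line in answer.split('\n'):
--         if line.startswith("Best SBS Code:"):
--             best_code = line.replace("Best SBS Code:", "").strip()
--         elif line.startswith("Best SBS Description:"):
--             best_desc = line.replace("Best SBS Description:", "").strip()
--         elif line.startswith("Explanation:"):
--             explanation = line.replace("Explanation:", "").strip()
--
--     return best_code, best_desc, explanation
-- ===== SOURCE B (Python) =====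
-- def _last_field(lines, prefix):
--     value = ""
--     for line in lines:
--         if line.startswith(prefix):
--             value = line.replace(prefix, "").strip()
--     return value
--
--
-- def parse_llm_answer(answer: str):
--     lines = answer.split('\n')
--     return (_last_field(lines, "Best SBS Code:"),
--             _last_field(lines, "Best SBS Description:"),
--             _last_field(lines, "Explanation:"))
-- ===== Notes on version B (the rewrite author's own statement) =====
-- stated objective: alternative
-- what changed: Replaces the single interleaved three-state loop with a per-field helper that scans the lines once per prefix (last match wins), called three times; equivalent because the three prefixes are mutually exclusive.
import Mathlib
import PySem

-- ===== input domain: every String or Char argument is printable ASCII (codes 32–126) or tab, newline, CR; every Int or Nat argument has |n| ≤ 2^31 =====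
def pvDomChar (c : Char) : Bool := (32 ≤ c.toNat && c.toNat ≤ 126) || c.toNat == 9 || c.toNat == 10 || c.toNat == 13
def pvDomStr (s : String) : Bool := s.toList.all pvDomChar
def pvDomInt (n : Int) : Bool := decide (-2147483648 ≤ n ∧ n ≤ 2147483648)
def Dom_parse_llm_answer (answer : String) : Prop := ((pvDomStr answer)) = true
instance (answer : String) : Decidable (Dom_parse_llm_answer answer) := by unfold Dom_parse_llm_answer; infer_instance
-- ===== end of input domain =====

-- B replaces A's single interleaved three-state loop with a per-field last-match scan called three times (alternative decomposition, same cost).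

-- ===== PORT A =====
-- exact: lines via PySem.Chars.splitOn ('\n' split), startswith/replace/strip via PySem.Chars
def parse_llm_answer (answer : String) : String × String × String :=
  let st := (PySem.Chars.splitOn answer.toList "\n".toList).foldl
    (fun (st : List Char × List Char × List Char) line =>
      if PySem.Chars.startswith line "Best SBS Code:".toList then
        (PySem.Chars.strip (PySem.Chars.replace line "Best SBS Code:".toList []), st.2.1, st.2.2)
      else if PySem.Chars.startswith line "Best SBS Description:".toList then
        (st.1, PySem.Chars.strip (PySem.Chars.replace line "Best SBS Description:".toList []), st.2.2)
      else if PySem.Chars.startswith line "Explanation:".toList then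
        (st.1, st.2.1, PySem.Chars.strip (PySem.Chars.replace line "Explanation:".toList []))
      else st)
    ([], [], [])
  (String.ofList st.1, String.ofList st.2.1, String.ofList st.2.2)

-- ===== PORT B =====
def lastField (lines : List (List Char)) (pre : List Char) : String :=
  String.ofList (lines.foldl
    (fun v line =>
      if PySem.Chars.startswith line pre then PySem.Chars.strip (PySem.Chars.replace line pre [])
      else v)
    [])

def parse_llm_answer_alt (answer : String) : String × String × String :=
  let lines := PySem.Chars.splitOn answer.toList "\n".toList
  (lastField lines "Best SBS Code:".toList,
   lastField lines "Best SBS Description:".toList,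
   lastField lines "Explanation:".toList)

-- ===== PRECONDITION & SPEC =====
def Spec_parse_llm_answer (answer : String) (out : String × String × String) : Prop := out = parse_llm_answer_alt answer
instance (answer : String) (out : String × String × String) : Decidable (Spec_parse_llm_answer answer out) := by unfold Spec_parse_llm_answer; infer_instance

-- ===== CLAIM (what is proved, stated in full; the proofs are below) =====
def Claim_equal_parse_llm_answer : Prop := ∀ (answer : String), Dom_parse_llm_answer answer → Spec_parse_llm_answer answer (parse_llm_answer answer)

-- ===== LEMMAS AND PROOFS =====

-- the per-field step of B (named for the proofs)
def fieldStep (pre : List Char) (v line : List Char) : List Char :=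
  if PySem.Chars.startswith line pre then PySem.Chars.strip (PySem.Chars.replace line pre []) else v

theorem lastField_eq_foldl (lines : List (List Char)) (pre : List Char) :
    lastField lines pre = String.ofList (lines.foldl (fieldStep pre) []) := rfl

-- the three prefixes are mutually exclusive: no line starts with two of them
theorem startswith_excl (p q s : List Char)
    (hpq : ¬ p <+: q) (hqp : ¬ q <+: p) :
    PySem.Chars.startswith s p = true → PySem.Chars.startswith s q = true → False := by
  intro h1 h2
  rw [PySem.Chars.startswith_iff] at h1 h2
  rcases List.prefix_or_prefix_of_prefix h1 h2 with h | h
  · exact hpq h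
  · exact hqp h

-- the interleaved fold equals the triple of per-field folds, for any start state
theorem fold_split (lines : List (List Char)) (a b c : List Char) :
    lines.foldl
      (fun (st : List Char × List Char × List Char) line =>
        if PySem.Chars.startswith line "Best SBS Code:".toList then
          (PySem.Chars.strip (PySem.Chars.replace line "Best SBS Code:".toList []), st.2.1, st.2.2)
        else if PySem.Chars.startswith line "Best SBS Description:".toList then
          (st.1, PySem.Chars.strip (PySem.Chars.replace line "Best SBS Description:".toList []), st.2.2)
        else if PySem.Chars.startswith line "Explanation:".toList then
          (st.1, st.2.1, PySem.Chars.strip (PySem.Chars.replace line "Explanation:".toList []))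
        else st)
      (a, b, c)
    = (lines.foldl (fieldStep "Best SBS Code:".toList) a,
       lines.foldl (fieldStep "Best SBS Description:".toList) b,
       lines.foldl (fieldStep "Explanation:".toList) c) := by
  induction lines generalizing a b c with
  | nil => rfl
  | cons l ls ih =>
    simp only [List.foldl_cons, fieldStep]
    by_cases h1 : PySem.Chars.startswith l "Best SBS Code:".toList = true
    · have h2 : ¬ PySem.Chars.startswith l "Best SBS Description:".toList = true := fun h =>
        startswith_excl _ _ l (by decide) (by decide) h1 h
      have h3 : ¬ PySem.Chars.startswith l "Explanation:".toList = true := fun h =>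
        startswith_excl _ _ l (by decide) (by decide) h1 h
      rw [if_pos h1, if_pos h1, if_neg h2, if_neg h3]
      exact ih _ _ _
    · by_cases h2 : PySem.Chars.startswith l "Best SBS Description:".toList = true
      · have h3 : ¬ PySem.Chars.startswith l "Explanation:".toList = true := fun h =>
          startswith_excl _ _ l (by decide) (by decide) h2 h
        rw [if_neg h1, if_neg h1, if_pos h2, if_pos h2, if_neg h3]
        exact ih _ _ _
      · by_cases h3 : PySem.Chars.startswith l "Explanation:".toList = true
        · rw [if_neg h1, if_neg h1, if_neg h2, if_neg h2, if_pos h3, if_pos h3]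
          exact ih _ _ _
        · rw [if_neg h1, if_neg h1, if_neg h2, if_neg h2, if_neg h3, if_neg h3]
          exact ih _ _ _

-- ===== VERDICT (by name: the statement is the Claim_ definition above) =====
theorem parse_llm_answer_spec : Claim_equal_parse_llm_answer := by
  intro answer _
  show parse_llm_answer answer = parse_llm_answer_alt answer
  unfold parse_llm_answer parse_llm_answer_alt
  simp only [lastField_eq_foldl, fold_split]
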